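-- pv_equiv track=rewrite | github.com/lzc978/digraph | word_method.py | important_words_find
-- ===== SOURCE A (Python) =====
-- def important_words_find(question, tables):
--     """ 检查通用性《重要词》, 子系统自己的通用词 ,返回尽可能多的重要词
--     :param question:
--     :param tables:
--     :return: []
--     """
--     ret = []
--     for table in tables:
--         if not table:
--             continue
--         for word in table:
--             if word in question:
--                 ret.append(word)
--     return ret
-- ===== SOURCE B (Python) =====
-- def important_words_find(question, tables):
--     lengths = {len(w) for t in tables for w in t}
--     subs = {question[i:i + L] for L in lengths for i in range(len(question) - L + 1)}
--     return [w for t in tables for w in t if w in subs]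
-- ===== Notes on version B (the rewrite author's own statement) =====
-- stated objective: faster
-- what changed: Instead of scanning the question once per word, B collects the distinct word lengths, precomputes the set of all substrings of the question having those lengths, and emits the words by one hashed set-membership pass over tables.
import Mathlib
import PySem

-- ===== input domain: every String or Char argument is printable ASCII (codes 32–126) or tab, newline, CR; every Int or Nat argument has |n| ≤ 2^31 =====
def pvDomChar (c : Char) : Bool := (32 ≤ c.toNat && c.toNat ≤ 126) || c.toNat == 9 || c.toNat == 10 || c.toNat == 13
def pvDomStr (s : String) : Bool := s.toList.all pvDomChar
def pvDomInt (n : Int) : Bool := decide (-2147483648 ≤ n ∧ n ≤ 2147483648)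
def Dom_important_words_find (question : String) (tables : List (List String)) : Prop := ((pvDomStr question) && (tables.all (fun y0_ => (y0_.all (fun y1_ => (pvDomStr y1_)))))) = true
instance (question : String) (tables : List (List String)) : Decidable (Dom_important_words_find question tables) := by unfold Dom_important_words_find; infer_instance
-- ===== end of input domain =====

-- B replaces A's per-word substring scans of the question by one precomputed set of the
-- question's substrings of the occurring word lengths, then a single set-membership pass (different algorithm; a timing run measured B faster).

-- ===== PORT A =====
-- literal port of A: nested loops, `if not table: continue`, append on `word in question`
def important_words_find (question : String) (tables : List (List String)) : List String :=
  tables.foldl (fun ret table =>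
    if table = [] then ret
    else table.foldl (fun ret word =>
      if PySem.Str.isIn word question then ret ++ [word] else ret) ret) []

-- ===== PORT B =====
-- literal port of Source B: the set of word lengths, the set of question substrings of those
-- lengths (held as List Char to compare kernel-transparently), one filtering pass
def pvLengths (tables : List (List String)) : PySem.Set Int :=
  PySem.Set.ofList (tables.flatMap (fun t => t.map (fun w => PySem.Str.len w)))

def pvSubs (question : String) (tables : List (List String)) : PySem.Set (List Char) :=
  PySem.Set.ofList ((pvLengths tables).flatMap (fun L =>
    (PySem.List.pyRange 0 (PySem.Str.len question - L + 1)).map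
      (fun i => PySem.List.slice question.toList (some i) (some (i + L)))))

def important_words_find_alt (question : String) (tables : List (List String)) : List String :=
  tables.flatMap (fun t => t.filter (fun w => PySem.Set.contains (pvSubs question tables) w.toList))

-- ===== PRECONDITION & SPEC =====
def Spec_important_words_find (question : String) (tables : List (List String)) (out : List String) : Prop := out = important_words_find_alt question tables
instance (question : String) (tables : List (List String)) (out : List String) : Decidable (Spec_important_words_find question tables out) := by unfold Spec_important_words_find; infer_instance

-- ===== CLAIM (what is proved, stated in full; the proofs are below) =====
def Claim_equal_important_words_find : Prop := ∀ (question : String) (tables : List (List String)), Dom_important_words_find question tables → Spec_important_words_find question tables (important_words_find question tables)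

-- ===== LEMMAS AND PROOFS =====

-- A flattens to one filter over the flattened word list
theorem pvA_eq (question : String) (tables : List (List String)) :
    important_words_find question tables
      = tables.flatMap (fun t => t.filter (fun w => PySem.Str.isIn w question)) := by
  unfold important_words_find
  have hstep : (fun (ret : List String) (table : List String) =>
      if table = [] then ret
      else table.foldl (fun ret word =>
        if PySem.Str.isIn word question then ret ++ [word] else ret) ret)
      = fun ret table => ret ++ table.filter (fun w => PySem.Str.isIn w question) := by
    funext ret table
    by_cases h : table = []
    · simp [h]
    · simp only [h]
      have := PySem.List.foldl_append_if (fun w => PySem.Str.isIn w question) id table ret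
      simpa using this
  rw [hstep, PySem.List.foldl_append_eq_flatMap]
  simp

-- membership in B's substring set characterises substring containment,
-- for any word whose length occurs among the collected lengths
theorem pvSubs_mem (question : String) (lengths : List Int) (w : String)
    (hL : (w.toList.length : Int) ∈ lengths) (hpos : ∀ L ∈ lengths, 0 ≤ L) :
    (w.toList ∈ lengths.flatMap (fun L =>
      (PySem.List.pyRange 0 (PySem.Str.len question - L + 1)).map
        (fun i => PySem.List.slice question.toList (some i) (some (i + L)))))
      ↔ PySem.Chars.isIn w.toList question.toList = true := by
  constructor
  · intro hmem
    rcases List.mem_flatMap.1 hmem with ⟨L, hLmem, hin⟩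
    rcases List.mem_map.1 hin with ⟨i, hi, hslice⟩
    rcases PySem.List.mem_pyRange_one.1 hi with ⟨hi0, _⟩
    have hLn : 0 ≤ L := hpos L hLmem
    rw [PySem.Chars.isIn_iff_infix]
    have hiN : i = ((i.toNat : Nat) : Int) := by omega
    have hLN : L = ((L.toNat : Nat) : Int) := by omega
    rw [hiN, hLN, PySem.List.slice_natCast_add] at hslice
    rw [← hslice]
    exact ((List.take_prefix _ _).isInfix).trans (List.drop_suffix _ _).isInfix
  · intro hisin
    rcases (PySem.Chars.exists_prefix_drop_iff_isIn w.toList question.toList).2 hisin with ⟨j, hj⟩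
    by_cases hjn : j ≤ question.toList.length
    · have hlen : w.toList.length + j ≤ question.toList.length := by
        have h1 := hj.length_le
        rw [List.length_drop] at h1
        omega
      refine List.mem_flatMap.2 ⟨(w.toList.length : Int), hL, List.mem_map.2 ⟨(j : Int), ?_, ?_⟩⟩
      · refine PySem.List.mem_pyRange_one.2 ⟨by positivity, ?_⟩
        rw [PySem.Str.len_eq]
        omega
      · rw [show ((j : Int) + ((w.toList.length : Nat) : Int))
              = ((j : Nat) : Int) + ((w.toList.length : Nat) : Int) from by ring,
          PySem.List.slice_natCast_add]
        exact (List.prefix_iff_eq_take.1 hj).symm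
    · -- j past the end of the question: w must be empty; witness index 0
      have hwnil : w.toList = [] := by
        have hdn : question.toList.drop j = [] := List.drop_eq_nil_of_le (by omega)
        rw [hdn] at hj
        exact List.prefix_nil.1 hj
      refine List.mem_flatMap.2 ⟨(w.toList.length : Int), hL, List.mem_map.2 ⟨(0 : Int), ?_, ?_⟩⟩
      · refine PySem.List.mem_pyRange_one.2 ⟨le_refl _, ?_⟩
        rw [PySem.Str.len_eq, hwnil]
        simp only [List.length_nil, Nat.cast_zero, sub_zero]
        positivity
      · rw [hwnil]
        simp [PySem.List.slice]

-- pointwise: for every word actually occurring in tables the two membership tests agree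
theorem pvPred_eq (question : String) (tables : List (List String))
    (t : List String) (ht : t ∈ tables) (w : String) (hw : w ∈ t) :
    PySem.Str.isIn w question = PySem.Set.contains (pvSubs question tables) w.toList := by
  have hL : ((w.toList.length : Nat) : Int) ∈ pvLengths tables := by
    unfold pvLengths
    rw [PySem.Set.mem_ofList]
    exact List.mem_flatMap.2 ⟨t, ht, List.mem_map.2 ⟨w, hw, by rw [PySem.Str.len_eq]⟩⟩
  apply Bool.coe_iff_coe.mp
  rw [PySem.Str.isIn_eq, PySem.Set.contains_iff]
  unfold pvSubs
  rw [PySem.Set.mem_ofList]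
  refine (pvSubs_mem question (pvLengths tables) w hL ?_).symm
  intro L hLm
  rcases List.mem_flatMap.1 ((PySem.Set.mem_ofList _ _).1 hLm) with ⟨t', _, hin⟩
  rcases List.mem_map.1 hin with ⟨w', _, hEq⟩
  rw [← hEq, PySem.Str.len_eq]
  positivity

-- ===== VERDICT (by name: the statement is the Claim_ definition above) =====
theorem important_words_find_spec : Claim_equal_important_words_find := by
  intro question tables _
  unfold Spec_important_words_find important_words_find_alt
  rw [pvA_eq]
  exact List.flatMap_congr (fun t ht =>
    List.filter_congr (fun w hw => pvPred_eq question tables t ht w hw))
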